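-- pv_equiv track=rewrite | github.com/VGabriel45/Keymaker | keymaker.py | remove_odd_blocks
-- ===== SOURCE A (Python) =====
-- def remove_odd_blocks(word, block_length):
--     sliced_words = []
--     even_words = []
--     count = 0
--     for _ in range(5):
--         sliced_words.append(word[count:count + block_length])
--         count += 3
--     for index in range(len(sliced_words)):
--         if index % 2 == 0:
--             even_words.append(sliced_words[index])
--     return ''.join(even_words)
-- ===== SOURCE B (Python) =====
-- def remove_odd_blocks(word, block_length):
--     # Simpler: only the blocks at offsets 0, 6, 12 survive A's build-then-filter.
--     return ''.join(word[i:i + block_length] for i in (0, 6, 12))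
-- ===== Notes on version B (the rewrite author's own statement) =====
-- stated objective: simpler
-- what changed: Replaces A's two-pass build-a-5-slice-list-then-filter-even-indices with a single join over the three surviving offsets (0, 6, 12) computed directly.
import Mathlib
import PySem

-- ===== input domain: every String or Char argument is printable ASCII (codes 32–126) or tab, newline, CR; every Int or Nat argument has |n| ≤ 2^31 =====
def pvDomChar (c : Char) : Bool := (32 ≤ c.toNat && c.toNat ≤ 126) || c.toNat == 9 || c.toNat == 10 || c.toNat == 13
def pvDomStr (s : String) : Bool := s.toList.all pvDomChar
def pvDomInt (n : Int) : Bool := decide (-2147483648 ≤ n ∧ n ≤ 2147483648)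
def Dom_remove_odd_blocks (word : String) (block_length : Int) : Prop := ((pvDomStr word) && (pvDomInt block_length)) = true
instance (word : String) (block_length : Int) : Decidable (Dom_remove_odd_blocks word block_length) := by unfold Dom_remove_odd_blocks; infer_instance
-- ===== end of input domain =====

-- B joins the three surviving block slices (offsets 0, 6, 12) directly instead of building a 5-slice list and filtering even indices: simpler.


-- ===== PORT A =====
def remove_odd_blocks (word : String) (block_length : Int) : String :=
  let loop := (PySem.List.pyRange 0 5 1).foldl
    (fun (st : List String × Int) _ =>
      (st.1 ++ [PySem.Str.slice word (some st.2) (some (st.2 + block_length))], st.2 + 3))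
    ([], 0)
  let sliced_words := loop.1
  let even_words := (PySem.List.pyRange 0 (sliced_words.length : Int) 1).foldl
    (fun (acc : List String) index =>
      if PySem.Int.mod index 2 == 0 then acc ++ [PySem.List.pyGetD sliced_words index ""] else acc)
    []
  PySem.Str.join "" even_words

-- ===== PORT B =====
def remove_odd_blocks_alt (word : String) (block_length : Int) : String :=
  PySem.Str.join "" (([0, 6, 12] : List Int).map
    (fun i => PySem.Str.slice word (some i) (some (i + block_length))))

-- ===== PRECONDITION & SPEC =====
def Spec_remove_odd_blocks (word : String) (block_length : Int) (out : String) : Prop := out = remove_odd_blocks_alt word block_length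
instance (word : String) (block_length : Int) (out : String) : Decidable (Spec_remove_odd_blocks word block_length out) := by unfold Spec_remove_odd_blocks; infer_instance

-- ===== CLAIM (what is proved, stated in full; the proofs are below) =====
def Claim_equal_remove_odd_blocks : Prop := ∀ (word : String) (block_length : Int), Dom_remove_odd_blocks word block_length → Spec_remove_odd_blocks word block_length (remove_odd_blocks word block_length)

-- ===== LEMMAS AND PROOFS =====

-- ===== VERDICT (by name: the statement is the Claim_ definition above) =====
theorem remove_odd_blocks_spec : Claim_equal_remove_odd_blocks := by
  intro word block_length _
  unfold Spec_remove_odd_blocks remove_odd_blocks remove_odd_blocks_alt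
  simp [PySem.List.pyRange_one, List.range_succ, PySem.List.pyGetD, PySem.Int.mod]
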